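-- pv_equiv track=rewrite | github.com/johnpalaios/proglang1 | ex2/ex2-b.py | stacksamenumber
-- ===== SOURCE A (Python) =====
-- def stacksamenumber(path):
--     j = 0
--     for i in range(len(path)):
--         if path[i] == 'Q':
--             j=j+1
--         if path[i] == 'S':
--             j=j-1
--     if j==0 :
--         return True
--     else :
--         return False
-- ===== SOURCE B (Python) =====
-- def stacksamenumber(path):
--     # Cancellation stack: push a token, but if the top is the opposite token
--     # the pair cancels and is popped instead.  The stack is always homogeneous
--     # (all 'Q' or all 'S'), so it ends empty exactly when the counts balance.
--     stack = []
--     for c in path: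
--         if c == 'Q' or c == 'S':
--             if stack and stack[-1] != c:
--                 stack.pop()
--             else:
--                 stack.append(c)
--     return not stack
-- ===== Notes on version B (the rewrite author's own statement) =====
-- stated objective: alternative
-- what changed: Replaces the running signed tally with a cancellation stack: each 'Q'/'S' is pushed unless the top of the stack is the opposite token, in which case the pair cancels; the counts balance exactly when the stack ends empty.
import Mathlib
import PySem

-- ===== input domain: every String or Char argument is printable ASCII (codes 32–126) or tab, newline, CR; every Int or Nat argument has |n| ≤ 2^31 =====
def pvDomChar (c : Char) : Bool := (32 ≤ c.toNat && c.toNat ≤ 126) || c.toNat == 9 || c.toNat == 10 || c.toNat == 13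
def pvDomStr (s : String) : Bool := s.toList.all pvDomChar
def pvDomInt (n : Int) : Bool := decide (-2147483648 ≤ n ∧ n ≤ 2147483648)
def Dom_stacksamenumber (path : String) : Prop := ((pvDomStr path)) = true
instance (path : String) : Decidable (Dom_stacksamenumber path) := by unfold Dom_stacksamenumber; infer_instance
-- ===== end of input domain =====

-- B replaces the running signed tally with a cancellation stack (push a token, pop when the top is the opposite token; balanced iff the stack ends empty). Objective: alternative algorithm, same cost.
-- ===== PORT A =====
-- for i in range(len(path)): two independent ifs updating j; then 'return True if j==0 else False'
def stacksamenumber (path : String) : Bool :=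
  let j : Int := path.toList.foldl
    (fun j c =>
      let j := if c == 'Q' then j + 1 else j
      if c == 'S' then j - 1 else j) 0
  if j = 0 then true else false

-- ===== PORT B =====
-- one loop step: 'if c in QS: if stack and stack[-1] != c: stack.pop() else: stack.append(c)'
-- (Python appends/pops at the END of the list; getLast?/dropLast/++ [c] mirror that exactly)
def pvStepB (stack : List Char) (c : Char) : List Char :=
  if c == 'Q' || c == 'S' then
    match stack.getLast? with
    | some t => if t != c then stack.dropLast else stack ++ [c]
    | none => stack ++ [c]
  else stack

def stacksamenumber_alt (path : String) : Bool :=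
  (path.toList.foldl pvStepB []).isEmpty

-- ===== PRECONDITION & SPEC =====
def Spec_stacksamenumber (path : String) (out : Bool) : Prop := out = stacksamenumber_alt path
instance (path : String) (out : Bool) : Decidable (Spec_stacksamenumber path out) := by unfold Spec_stacksamenumber; infer_instance

-- ===== CLAIM =====
def Claim_equal_stacksamenumber : Prop := ∀ (path : String), Dom_stacksamenumber path → Spec_stacksamenumber path (stacksamenumber path)

-- ===== LEMMAS AND PROOFS =====
-- coupling invariant: B's stack is a homogeneous run of 'Q's (tally = +n) or of 'S's (tally = -n)
def pvRel (stack : List Char) (j : Int) : Prop :=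
  (∃ n : Nat, stack = List.replicate n 'Q' ∧ j = n) ∨
  (∃ n : Nat, stack = List.replicate n 'S' ∧ j = -(n : Int))

theorem pvRel_step (stack : List Char) (j : Int) (c : Char) (h : pvRel stack j) :
    pvRel (pvStepB stack c)
      (let j := if c == 'Q' then j + 1 else j
       if c == 'S' then j - 1 else j) := by
  by_cases hq : c = 'Q'
  · subst hq
    rcases h with ⟨n, hs, hj⟩ | ⟨n, hs, hj⟩ <;> subst hs
    · exact Or.inl ⟨n + 1, by
        cases n <;>
          simp [pvStepB, List.getLast?_replicate, List.replicate_succ'.symm],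
        by simp [hj]⟩
    · cases n with
      | zero => exact Or.inl ⟨1, by simp [pvStepB], by simp [hj]⟩
      | succ m =>
        exact Or.inr ⟨m, by
          simp [pvStepB, List.getLast?_replicate, List.replicate_succ' (n := m)],
          by simp only [beq_self_eq_true, if_pos, beq_iff_eq, reduceCtorEq]; simp; omega⟩
  · by_cases hsS : c = 'S'
    · subst hsS
      rcases h with ⟨n, hs, hj⟩ | ⟨n, hs, hj⟩ <;> subst hs
      · cases n with
        | zero => exact Or.inr ⟨1, by simp [pvStepB], by simp [hj]⟩
        | succ m =>
          exact Or.inl ⟨m, by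
            simp [pvStepB, List.getLast?_replicate, List.replicate_succ' (n := m)],
            by simp [hj]⟩
      · exact Or.inr ⟨n + 1, by
          cases n <;>
            simp [pvStepB, List.getLast?_replicate, List.replicate_succ'.symm],
          by simp only [beq_self_eq_true, if_pos, beq_iff_eq, reduceCtorEq]; simp; omega⟩
    · have heq : pvStepB stack c = stack := by simp [pvStepB, hq, hsS]
      rw [heq]
      simpa [hq, hsS] using h

theorem pvRel_fold (l : List Char) : ∀ (stack : List Char) (j : Int), pvRel stack j →
    pvRel (l.foldl pvStepB stack)
      (l.foldl (fun j c =>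
        let j := if c == 'Q' then j + 1 else j
        if c == 'S' then j - 1 else j) j) := by
  induction l with
  | nil => intro stack j h; exact h
  | cons c l ih =>
    intro stack j h
    exact ih _ _ (pvRel_step stack j c h)

theorem stacksamenumber_spec : Claim_equal_stacksamenumber := by
  intro path _
  unfold Spec_stacksamenumber stacksamenumber stacksamenumber_alt
  have h := pvRel_fold path.toList [] 0 (Or.inl ⟨0, by simp, by simp⟩)
  rcases h with ⟨n, hs, hj⟩ | ⟨n, hs, hj⟩ <;>
  · rw [hs]
    simp only [hj]
    cases n <;> simp [List.replicate_succ] <;> omega
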